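/- GENERATED by tools/mkcompositions.py from design/units.gif.tsv (unit `GifFreeSavedImages.COMPOSITION`) — do not edit.
   THE PROOF of the composition unit `GifFreeSavedImages.COMPOSITION`: the 3 segments of `GifFreeSavedImages` chain into its contract, by the theorem
   `Gif.Spec.GifFreeSavedImages.compose` (proved next to the cut assertions). -/
import Gif.Spec.Units.GifFreeSavedImages_COMPOSITION

/-- The segments of `GifFreeSavedImages` compose into its contract. -/
theorem Gif.Spec.Proved.GifFreeSavedImages_COMPOSITION_ok : Gif.Spec.GifFreeSavedImages_COMPOSITION.Statement := by
  intro Lay _hLay μ _hμ u₀ h_GifFreeSavedImages_1 h_GifFreeSavedImages_2 h_GifFreeSavedImages_3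
  apply Gif.Spec.GifFreeSavedImages.compose
  all_goals assumption
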